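-- pv_equiv track=rewrite | github.com/chenxu0602/LeetCode | 2973.find-number-of-coins-to-place-in-tree-nodes.py | placedCoins
-- ===== SOURCE A (Python) =====
-- from typing import List
--
-- from itertools import chain, combinations
-- from collections import defaultdict
-- from math import prod
--
-- def placedCoins(edges: List[List[int]], cost: List[int]) -> List[int]:
--
--     g = defaultdict(list)
--     for u, v in edges:
--         g[u].append(v)
--         g[v].append(u)
--
--     coin = [0] * len(cost)
--
--     def dfs(v, p):
--         subtree = [cost[v]] + list(chain.from_iterable(dfs(u, v) for u in g[v] if u != p))
--         candidates = sorted(subtree)[:3] + sorted(subtree)[3:][-3:]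
--         coin[v] = max(0, max(map(prod, combinations(candidates, 3)), default=1))
--         return candidates
--
--     dfs(0, 0)
--     return coin
-- ===== SOURCE B (Python) =====
-- from typing import List
--
-- def placedCoins(edges: List[List[int]], cost: List[int]) -> List[int]:
--     g = {}
--     for u, v in edges:
--         g.setdefault(u, []).append(v)
--         g.setdefault(v, []).append(u)
--
--     coin = [0] * len(cost)
--
--     # explicit-stack (defunctionalized) post-order traversal: each frame is
--     # [node, parent, pending children, accumulated candidate values]
--     stack = [[0, 0, list(g.get(0, [])), [cost[0]]]]
--     while stack:
--         frame = stack[-1]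
--         if frame[2]:
--             u = frame[2].pop(0)
--             if u != frame[1]:
--                 stack.append([u, frame[0], list(g.get(u, [])), [cost[u]]])
--         else:
--             v = frame[0]
--             s = sorted(frame[3])
--             cand = s[:3] + s[3:][-3:]
--             if len(cand) < 3:
--                 coin[v] = 1
--             else:
--                 coin[v] = max(0, cand[-1] * cand[-2] * cand[-3],
--                               cand[0] * cand[1] * cand[-1])
--             stack.pop()
--             if stack:
--                 stack[-1][3].extend(cand)
--     return coin
-- ===== Notes on version B (the rewrite author's own statement) =====
-- stated objective: alternative
-- what changed: B replaces A's recursive DFS (per-node return values + itertools.combinations/math.prod enumeration of all 20 triples) by an iterative defunctionalized traversal over an explicit frame stack (node, parent, pending children, accumulated values), writing each coin with the closed-form max-product-of-three formula instead of enumerating combinations.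
-- outside the precondition, e.g. on placedCoins([[0, 0]], [5]): A returns [1], B returns [1]
import Mathlib
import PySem

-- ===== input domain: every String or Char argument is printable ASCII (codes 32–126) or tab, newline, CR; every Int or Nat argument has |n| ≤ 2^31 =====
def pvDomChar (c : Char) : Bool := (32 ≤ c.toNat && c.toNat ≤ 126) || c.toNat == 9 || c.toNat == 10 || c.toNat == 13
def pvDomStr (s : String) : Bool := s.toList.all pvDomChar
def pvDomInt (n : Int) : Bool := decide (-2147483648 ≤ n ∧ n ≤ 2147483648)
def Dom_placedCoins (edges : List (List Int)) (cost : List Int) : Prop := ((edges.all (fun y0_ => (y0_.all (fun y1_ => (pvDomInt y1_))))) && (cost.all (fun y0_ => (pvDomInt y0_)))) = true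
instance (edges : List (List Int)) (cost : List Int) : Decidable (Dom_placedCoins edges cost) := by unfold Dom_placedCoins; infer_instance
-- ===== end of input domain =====

-- B replaces A's recursive DFS (return-value candidate lists + combinations/prod enumeration)
-- by an iterative traversal over an explicit frame stack with the closed-form
-- max-product-of-three formula per node.  The claim is about return values.

-- ===== PORT A =====

-- math.prod over a list of ints: left fold of * from 1 (exact)
def pyProd (l : List Int) : Int := l.foldl (· * ·) 1

-- g = defaultdict(list); for u, v in edges: g[u].append(v); g[v].append(u)
-- (an edge not of length 2 raises ValueError in Python: outside Pre_, the port skips it)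
def buildGA (edges : List (List Int)) : PySem.Dict Int (List Int) :=
  edges.foldl (fun g e =>
    match e with
    | [u, v] => ((g.modify u [] (· ++ [v])).modify v [] (· ++ [u]))
    | _ => g) PySem.Dict.empty

-- def dfs(v, p): … — fueled recursion (fuel = edges.length + 1 bounds the depth on Pre_ inputs;
-- outside Pre_ the Python recursion may not terminate).  chainA is
-- list(chain.from_iterable(dfs(u, v) for u in g[v] if u != p)) threading the mutated coin list.
mutual
def dfsA (g : PySem.Dict Int (List Int)) (cost : List Int) :
    Nat → Int → Int → List Int → List Int × List Int
  | 0, _, _, coin => ([], coin)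
  | fuel + 1, v, p, coin =>
    let (subs, coin1) := chainA g cost fuel v ((g.getD v []).filter (fun u => u != p)) coin
    let subtree := PySem.List.pyGetD cost v 0 :: subs   -- cost[v] (InRange under Pre_)
    let s := PySem.List.sorted subtree (fun x => x)
    let candidates := PySem.List.slice s none (some 3) ++
      PySem.List.slice (PySem.List.slice s (some 3) none) (some (-3)) none
    let best := PySem.List.maxD ((PySem.List.combinations candidates 3).map pyProd) (fun x => x) 1
    (candidates, PySem.List.pySetD coin1 v (max 0 best))   -- coin[v] = max(0, …)
  termination_by fuel _ _ _ => (fuel, 0)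
def chainA (g : PySem.Dict Int (List Int)) (cost : List Int) (fuel : Nat) (v : Int) :
    List Int → List Int → List Int × List Int
  | [], coin => ([], coin)
  | u :: us, coin =>
    let (c, coin1) := dfsA g cost fuel u v coin
    let (rest, coin2) := chainA g cost fuel v us coin1
    (c ++ rest, coin2)
  termination_by l _ => (fuel, l.length + 1)
end

def placedCoins (edges : List (List Int)) (cost : List Int) : List Int :=
  (dfsA (buildGA edges) cost (edges.length + 1) 0 0 (List.replicate cost.length 0)).2

-- ===== PORT B =====

-- g = {}; for u, v in edges: g.setdefault(u, []).append(v); g.setdefault(v, []).append(u)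
def buildGB (edges : List (List Int)) : PySem.Dict Int (List Int) :=
  edges.foldl (fun g e =>
    match e with
    | [u, v] =>
      let g1 := g.setdefault u []
      let g2 := g1.insert u (g1.getD u [] ++ [v])
      let g3 := g2.setdefault v []
      g3.insert v (g3.getD v [] ++ [u])
    | _ => g) PySem.Dict.empty

-- a frame of B's explicit stack: (fuel, node v, parent p, pending children, accumulated sub).
-- The fuel component and the machine's step fuel are totality guards only (the Python while
-- loop is unbounded; on Pre_ inputs neither guard ever triggers).

-- 'if stack: stack[-1][3].extend(cand)'
def extendTop : List (Nat × Int × Int × List Int × List Int) → List Int →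
    List (Nat × Int × Int × List Int × List Int)
  | [], _ => []
  | (f, v, p, pend, sub) :: fs, c => (f, v, p, pend, sub ++ c) :: fs

-- the while loop: peek the top frame; dispatch the next pending child (skipping the parent),
-- or finish the frame: sort sub, form cand, write coin[v] by the closed-form formula, pop,
-- extend the parent's sub by cand.
def runM (g : PySem.Dict Int (List Int)) (cost : List Int) :
    Nat → List (Nat × Int × Int × List Int × List Int) → List Int → List Int
  | 0, _, coin => coin
  | _ + 1, [], coin => coin
  | mf + 1, (0, _, _, _, _) :: fs, coin => runM g cost mf (extendTop fs []) coin
  | mf + 1, (_ + 1, v, _, [], sub) :: fs, coin =>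
    let s := PySem.List.sorted sub (fun x => x)    -- s = sorted(frame[3])
    let cand := PySem.List.slice s none (some 3) ++
      PySem.List.slice (PySem.List.slice s (some 3) none) (some (-3)) none
    let val : Int := if cand.length < 3 then 1
      else max (max 0 (PySem.List.pyGetD cand (-1) 0 * PySem.List.pyGetD cand (-2) 0 *
                       PySem.List.pyGetD cand (-3) 0))
               (PySem.List.pyGetD cand 0 0 * PySem.List.pyGetD cand 1 0 *
                PySem.List.pyGetD cand (-1) 0)
    runM g cost mf (extendTop fs cand) (PySem.List.pySetD coin v val)
  | mf + 1, (f + 1, v, p, u :: us, sub) :: fs, coin =>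
    if u != p then
      runM g cost mf ((f, u, v, g.getD u [], [PySem.List.pyGetD cost u 0]) ::
        (f + 1, v, p, us, sub) :: fs) coin
    else runM g cost mf ((f + 1, v, p, us, sub) :: fs) coin

-- step-count of a finished run from one frame (fuel guard for the while loop; mirrors the
-- recursion depth bound fuel = edges.length + 1 of port A)
mutual
def dstepsM (g : PySem.Dict Int (List Int)) : Nat → Int → Int → Nat
  | 0, _, _ => 1
  | f + 1, v, p => cstepsM g f v p (g.getD v [])
  termination_by f _ _ => (f, 0)
def cstepsM (g : PySem.Dict Int (List Int)) (f : Nat) (v p : Int) : List Int → Nat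
  | [] => 1
  | u :: us => 1 + (if u != p then dstepsM g f u v else 0) + cstepsM g f v p us
  termination_by l => (f, l.length + 1)
end

def placedCoins_alt (edges : List (List Int)) (cost : List Int) : List Int :=
  let g := buildGB edges
  runM g cost (dstepsM g (edges.length + 1) 0 0 + 1)
    [(edges.length + 1, 0, 0, g.getD 0 [], [PySem.List.pyGetD cost 0 0])]
    (List.replicate cost.length 0)

-- ===== PRECONDITION & SPEC =====

-- the edges as (u, v) pairs (length-2 rows; Pre_ makes this all of them)
def pvPairs (edges : List (List Int)) : List (Int × Int) :=
  edges.filterMap (fun e => match e with | [u, v] => some (u, v) | _ => none)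

-- vertices connected to node 0: edge-count-many relaxation passes over the input edge list
-- (a property of the input graph, not a run of either port)
def pvReach (edges : List (List Int)) : List Int :=
  (fun S => (pvPairs edges).foldl (fun S uv =>
      let S := if uv.1 ∈ S ∧ uv.2 ∉ S then S ++ [uv.2] else S
      if uv.2 ∈ S ∧ uv.1 ∉ S then S ++ [uv.1] else S) S)^[2 * edges.length + 1] [0]

-- the distinct undirected edges of the component of 0
def pvCompEdges (edges : List (List Int)) : List (Int × Int) :=
  (((pvPairs edges).filter (fun uv => uv.1 ∈ pvReach edges)).map
    (fun uv => if uv.1 ≤ uv.2 then uv else (uv.2, uv.1))).dedup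

-- Pre_: the inputs on which the Python A returns normally: every edge is a pair, cost is
-- nonempty, every vertex connected to node 0 is a valid Python index into cost, and the
-- component of 0 is a tree (connected with at most |C| - 1 distinct edges hence acyclic, so the
-- recursion terminates; parts of the graph not connected to 0 are unconstrained).  It is
-- narrower than "A returns" only on self-loop edges inside the component of 0, on which A still
-- returns (B agrees with A there; see the cite in claim.json).
def Pre_placedCoins (edges : List (List Int)) (cost : List Int) : Prop :=
  (∀ e ∈ edges, e.length = 2) ∧
  1 ≤ cost.length ∧
  (∀ v ∈ pvReach edges, -(cost.length : Int) ≤ v ∧ v < (cost.length : Int)) ∧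
  (∀ uv ∈ pvPairs edges, uv.1 ∈ pvReach edges → uv.1 ≠ uv.2) ∧
  (pvCompEdges edges).length ≤ (pvReach edges).length - 1

instance (edges : List (List Int)) (cost : List Int) : Decidable (Pre_placedCoins edges cost) := by
  unfold Pre_placedCoins; infer_instance

def pvWitness_placedCoins : List (List Int) × List Int := ([[0, 1]], [1, 2])

def Spec_placedCoins (edges : List (List Int)) (cost : List Int) (out : List Int) : Prop :=
  out = placedCoins_alt edges cost
instance (edges : List (List Int)) (cost : List Int) (out : List Int) :
    Decidable (Spec_placedCoins edges cost out) := by unfold Spec_placedCoins; infer_instance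

-- ===== CLAIM (what is proved, stated in full; the proofs are below) =====
def Claim_equal_placedCoins : Prop := ∀ (edges : List (List Int)) (cost : List Int), Dom_placedCoins edges cost → Pre_placedCoins edges cost → Spec_placedCoins edges cost (placedCoins edges cost)

-- ===== LEMMAS AND PROOFS =====

-- the shared candidate expression and B's closed-form coin value, as proof abbreviations
def candOf (sub : List Int) : List Int :=
  PySem.List.slice (PySem.List.sorted sub (fun x => x)) none (some 3) ++
    PySem.List.slice (PySem.List.slice (PySem.List.sorted sub (fun x => x)) (some 3) none)
      (some (-3)) none

def valOf (cand : List Int) : Int :=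
  if cand.length < 3 then 1
  else max (max 0 (PySem.List.pyGetD cand (-1) 0 * PySem.List.pyGetD cand (-2) 0 *
                   PySem.List.pyGetD cand (-3) 0))
           (PySem.List.pyGetD cand 0 0 * PySem.List.pyGetD cand 1 0 *
            PySem.List.pyGetD cand (-1) 0)

-- one defaultdict append step equals B's setdefault + append step
lemma sd_append (g : PySem.Dict Int (List Int)) (u x : Int) :
    (let g1 := g.setdefault u []
     g1.insert u (g1.getD u [] ++ [x])) = g.modify u [] (· ++ [x]) := by
  show (g.setdefault u []).insert u ((g.setdefault u []).getD u [] ++ [x]) = _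
  by_cases h : g.contains u
  · rw [PySem.Dict.setdefault_of_contains g [] h]
    rfl
  · have h' : g.contains u = false := by simpa using h
    rw [PySem.Dict.setdefault_of_not_contains g [] h']
    show (g.insert u []).insert u ((g.insert u []).getD u [] ++ [x]) = _
    rw [PySem.Dict.getD_insert_self, PySem.Dict.insert_insert_self]
    unfold PySem.Dict.modify
    simp [PySem.Dict.getD_of_not_contains g [] h']

-- the two adjacency builders agree
lemma buildG_eq (edges : List (List Int)) : buildGA edges = buildGB edges := by
  unfold buildGA buildGB
  apply PySem.List.foldl_congr_mem
  intro g e _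
  match e with
  | [] => rfl
  | [_] => rfl
  | u :: v :: _ :: _ => rfl
  | [u, v] =>
    show (g.modify u [] (· ++ [v])).modify v [] (· ++ [u]) = _
    rw [← sd_append g u v, ← sd_append _ v u]

-- maximum product of three entries of a sorted list is bounded by
-- max(product of the three largest, product of the two smallest and the largest)
lemma tri (a b d e f M : Int) (h0 : 0 ≤ M) (hdef : d * e * f ≤ M) (habf : a * b * f ≤ M) :
    ∀ x y z : Int, a ≤ x → b ≤ y → x ≤ y → y ≤ z → x ≤ d → y ≤ e → z ≤ f →
      1 * x * y * z ≤ M := by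
  intro x y z hax hby hxy hyz hxd hye hzf
  rw [one_mul]
  rcases le_or_gt z 0 with hz | hz
  · have hx0 : x ≤ 0 := le_trans hxy (le_trans hyz hz)
    have hy0 : y ≤ 0 := le_trans hyz hz
    have hp : 0 ≤ x * y := Int.mul_nonneg_of_nonpos_of_nonpos hx0 hy0
    nlinarith [mul_nonpos_of_nonneg_of_nonpos hp hz]
  · rcases le_or_gt 0 y with hy | hy
    · rcases le_or_gt 0 x with hx | hx
      · have hd : (0:Int) ≤ d := le_trans hx hxd
        have he : (0:Int) ≤ e := le_trans hy hye
        have h1 : x * y ≤ d * e := mul_le_mul hxd hye hy hd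
        have h2 : x * y * z ≤ d * e * z := mul_le_mul_of_nonneg_right h1 (le_of_lt hz)
        have h3 : d * e * z ≤ d * e * f := mul_le_mul_of_nonneg_left hzf (mul_nonneg hd he)
        linarith
      · have : x * (y * z) ≤ 0 :=
          mul_nonpos_of_nonpos_of_nonneg (le_of_lt hx) (mul_nonneg hy (le_of_lt hz))
        nlinarith
    · have hb : b < 0 := lt_of_le_of_lt hby hy
      have hxy' : x * y ≤ a * b := by nlinarith
      have hp : 0 < x * y := mul_pos_of_neg_of_neg (lt_of_le_of_lt hxy hy) hy
      have h2 : x * y * z ≤ a * b * z := mul_le_mul_of_nonneg_right hxy' (le_of_lt hz)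
      have h3 : a * b * z ≤ a * b * f := by
        have hab : 0 < a * b := lt_of_lt_of_le hp hxy'
        exact mul_le_mul_of_nonneg_left hzf (le_of_lt hab)
      linarith

-- the closed-form coin formula equals the combinations maximum on a sorted candidate list
set_option maxHeartbeats 1000000 in
lemma coin_formula (c : List Int) (hs : c.Pairwise (· ≤ ·)) (hlen : c.length ≤ 6) :
    max 0 (PySem.List.maxD ((PySem.List.combinations c 3).map pyProd) (fun x => x) 1)
      = valOf c := by
  unfold valOf
  rcases c with _ | ⟨a, _ | ⟨b, _ | ⟨c3, _ | ⟨d, _ | ⟨e, _ | ⟨f, rest⟩⟩⟩⟩⟩⟩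
  · rfl
  · rfl
  · rfl
  · -- length 3
    simp only [List.pairwise_cons] at hs
    obtain ⟨ph0, ph1, -⟩ := hs
    have h_a_b : a ≤ b := ph0 b (by simp)
    have h_b_c3 : b ≤ c3 := ph1 c3 (by simp)
    have h_a_c3 : a ≤ c3 := le_trans h_a_b h_b_c3
    rw [show PySem.List.maxD ((PySem.List.combinations [a,b,c3] 3).map pyProd)
          (fun x => x) 1 = 1*a*b*c3 by
        rw [show (PySem.List.combinations [a,b,c3] 3).map pyProd =
            [1*a*b*c3] from rfl]
        simp only [PySem.List.maxD]
        rw [PySem.List.max?_id_cons]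
        rfl]
    show max 0 (1*a*b*c3) = max (max 0 (c3 * b * a)) (a * b * c3)
    set M := max (max 0 (c3 * b * a)) (a * b * c3) with hM
    have h0 : (0:Int) ≤ M := le_trans (le_max_left 0 _) (le_max_left _ _)
    have hX : c3 * b * a ≤ M := le_trans (le_max_right 0 _) (le_max_left _ _)
    have hY : a * b * c3 ≤ M := le_max_right _ _
    have hdef : a * b * c3 ≤ M := by
      calc a * b * c3 = c3 * b * a := by ring
        _ ≤ M := hX
    have habf : a * b * c3 ≤ M := by
      calc a * b * c3 = a * b * c3 := by ring
        _ ≤ M := hY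
    have T := tri a b a b c3 M h0 hdef habf
    apply le_antisymm
    · apply max_le h0
      try simp only [max_le_iff]
      repeat' apply And.intro
      all_goals exact T _ _ _ (by linarith) (by linarith) (by linarith) (by linarith) (by linarith) (by linarith) (by linarith)
    · rw [hM]
      apply max_le
      · apply max_le (le_max_left 0 _)
        rw [show c3 * b * a = 1*a*b*c3 from by ring]
        exact le_max_right 0 _
      · rw [show a * b * c3 = 1*a*b*c3 from by ring]
        exact le_trans (le_refl _) (le_max_right 0 _)
  · -- length 4
    simp only [List.pairwise_cons] at hs
    obtain ⟨ph0, ph1, ph2, -⟩ := hs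
    have h_a_b : a ≤ b := ph0 b (by simp)
    have h_b_c3 : b ≤ c3 := ph1 c3 (by simp)
    have h_c3_d : c3 ≤ d := ph2 d (by simp)
    have h_a_c3 : a ≤ c3 := le_trans h_a_b h_b_c3
    have h_a_d : a ≤ d := le_trans h_a_c3 h_c3_d
    have h_b_d : b ≤ d := le_trans h_b_c3 h_c3_d
    rw [show PySem.List.maxD ((PySem.List.combinations [a,b,c3,d] 3).map pyProd)
          (fun x => x) 1 = max (max (max (1*a*b*c3) (1*a*b*d)) (1*a*c3*d)) (1*b*c3*d) by
        rw [show (PySem.List.combinations [a,b,c3,d] 3).map pyProd =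
            [1*a*b*c3, 1*a*b*d, 1*a*c3*d, 1*b*c3*d] from rfl]
        simp only [PySem.List.maxD]
        rw [PySem.List.max?_id_cons]
        rfl]
    show max 0 (max (max (max (1*a*b*c3) (1*a*b*d)) (1*a*c3*d)) (1*b*c3*d)) = max (max 0 (d * c3 * b)) (a * b * d)
    set M := max (max 0 (d * c3 * b)) (a * b * d) with hM
    have h0 : (0:Int) ≤ M := le_trans (le_max_left 0 _) (le_max_left _ _)
    have hX : d * c3 * b ≤ M := le_trans (le_max_right 0 _) (le_max_left _ _)
    have hY : a * b * d ≤ M := le_max_right _ _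
    have hdef : b * c3 * d ≤ M := by
      calc b * c3 * d = d * c3 * b := by ring
        _ ≤ M := hX
    have habf : a * b * d ≤ M := by
      calc a * b * d = a * b * d := by ring
        _ ≤ M := hY
    have T := tri a b b c3 d M h0 hdef habf
    apply le_antisymm
    · apply max_le h0
      try simp only [max_le_iff]
      repeat' apply And.intro
      all_goals exact T _ _ _ (by linarith) (by linarith) (by linarith) (by linarith) (by linarith) (by linarith) (by linarith)
    · rw [hM]
      apply max_le
      · apply max_le (le_max_left 0 _)
        rw [show d * c3 * b = 1*b*c3*d from by ring]
        exact le_trans (le_max_right _ _) (le_max_right 0 _)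
      · rw [show a * b * d = 1*a*b*d from by ring]
        have hy : 1*a*b*d ≤ max (1*a*b*c3) (1*a*b*d) := le_max_right _ _
        have hy := le_trans hy (le_max_left (max (1*a*b*c3) (1*a*b*d)) (1*a*c3*d))
        have hy := le_trans hy (le_max_left (max (max (1*a*b*c3) (1*a*b*d)) (1*a*c3*d)) (1*b*c3*d))
        exact le_trans hy (le_max_right 0 _)
  · -- length 5
    simp only [List.pairwise_cons] at hs
    obtain ⟨ph0, ph1, ph2, ph3, -⟩ := hs
    have h_a_b : a ≤ b := ph0 b (by simp)
    have h_b_c3 : b ≤ c3 := ph1 c3 (by simp)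
    have h_c3_d : c3 ≤ d := ph2 d (by simp)
    have h_d_e : d ≤ e := ph3 e (by simp)
    have h_a_c3 : a ≤ c3 := le_trans h_a_b h_b_c3
    have h_a_d : a ≤ d := le_trans h_a_c3 h_c3_d
    have h_a_e : a ≤ e := le_trans h_a_d h_d_e
    have h_b_d : b ≤ d := le_trans h_b_c3 h_c3_d
    have h_b_e : b ≤ e := le_trans h_b_d h_d_e
    have h_c3_e : c3 ≤ e := le_trans h_c3_d h_d_e
    rw [show PySem.List.maxD ((PySem.List.combinations [a,b,c3,d,e] 3).map pyProd)
          (fun x => x) 1 = max (max (max (max (max (max (max (max (max (1*a*b*c3) (1*a*b*d)) (1*a*b*e)) (1*a*c3*d)) (1*a*c3*e)) (1*a*d*e)) (1*b*c3*d)) (1*b*c3*e)) (1*b*d*e)) (1*c3*d*e) by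
        rw [show (PySem.List.combinations [a,b,c3,d,e] 3).map pyProd =
            [1*a*b*c3, 1*a*b*d, 1*a*b*e, 1*a*c3*d, 1*a*c3*e, 1*a*d*e, 1*b*c3*d, 1*b*c3*e, 1*b*d*e, 1*c3*d*e] from rfl]
        simp only [PySem.List.maxD]
        rw [PySem.List.max?_id_cons]
        rfl]
    show max 0 (max (max (max (max (max (max (max (max (max (1*a*b*c3) (1*a*b*d)) (1*a*b*e)) (1*a*c3*d)) (1*a*c3*e)) (1*a*d*e)) (1*b*c3*d)) (1*b*c3*e)) (1*b*d*e)) (1*c3*d*e)) = max (max 0 (e * d * c3)) (a * b * e)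
    set M := max (max 0 (e * d * c3)) (a * b * e) with hM
    have h0 : (0:Int) ≤ M := le_trans (le_max_left 0 _) (le_max_left _ _)
    have hX : e * d * c3 ≤ M := le_trans (le_max_right 0 _) (le_max_left _ _)
    have hY : a * b * e ≤ M := le_max_right _ _
    have hdef : c3 * d * e ≤ M := by
      calc c3 * d * e = e * d * c3 := by ring
        _ ≤ M := hX
    have habf : a * b * e ≤ M := by
      calc a * b * e = a * b * e := by ring
        _ ≤ M := hY
    have T := tri a b c3 d e M h0 hdef habf
    apply le_antisymm
    · apply max_le h0
      try simp only [max_le_iff]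
      repeat' apply And.intro
      all_goals exact T _ _ _ (by linarith) (by linarith) (by linarith) (by linarith) (by linarith) (by linarith) (by linarith)
    · rw [hM]
      apply max_le
      · apply max_le (le_max_left 0 _)
        rw [show e * d * c3 = 1*c3*d*e from by ring]
        exact le_trans (le_max_right _ _) (le_max_right 0 _)
      · rw [show a * b * e = 1*a*b*e from by ring]
        have hy : 1*a*b*e ≤ max (max (1*a*b*c3) (1*a*b*d)) (1*a*b*e) := le_max_right _ _
        have hy := le_trans hy (le_max_left (max (max (1*a*b*c3) (1*a*b*d)) (1*a*b*e)) (1*a*c3*d))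
        have hy := le_trans hy (le_max_left (max (max (max (1*a*b*c3) (1*a*b*d)) (1*a*b*e)) (1*a*c3*d)) (1*a*c3*e))
        have hy := le_trans hy (le_max_left (max (max (max (max (1*a*b*c3) (1*a*b*d)) (1*a*b*e)) (1*a*c3*d)) (1*a*c3*e)) (1*a*d*e))
        have hy := le_trans hy (le_max_left (max (max (max (max (max (1*a*b*c3) (1*a*b*d)) (1*a*b*e)) (1*a*c3*d)) (1*a*c3*e)) (1*a*d*e)) (1*b*c3*d))
        have hy := le_trans hy (le_max_left (max (max (max (max (max (max (1*a*b*c3) (1*a*b*d)) (1*a*b*e)) (1*a*c3*d)) (1*a*c3*e)) (1*a*d*e)) (1*b*c3*d)) (1*b*c3*e))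
        have hy := le_trans hy (le_max_left (max (max (max (max (max (max (max (1*a*b*c3) (1*a*b*d)) (1*a*b*e)) (1*a*c3*d)) (1*a*c3*e)) (1*a*d*e)) (1*b*c3*d)) (1*b*c3*e)) (1*b*d*e))
        have hy := le_trans hy (le_max_left (max (max (max (max (max (max (max (max (1*a*b*c3) (1*a*b*d)) (1*a*b*e)) (1*a*c3*d)) (1*a*c3*e)) (1*a*d*e)) (1*b*c3*d)) (1*b*c3*e)) (1*b*d*e)) (1*c3*d*e))
        exact le_trans hy (le_max_right 0 _)
  · -- length ≥ 6: rest must be empty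
    have hrest : rest = [] := by
      simp only [List.length_cons] at hlen
      exact List.eq_nil_of_length_eq_zero (by omega)
    subst hrest
    simp only [List.pairwise_cons] at hs
    obtain ⟨ph0, ph1, ph2, ph3, ph4, -⟩ := hs
    have h_a_b : a ≤ b := ph0 b (by simp)
    have h_b_c3 : b ≤ c3 := ph1 c3 (by simp)
    have h_c3_d : c3 ≤ d := ph2 d (by simp)
    have h_d_e : d ≤ e := ph3 e (by simp)
    have h_e_f : e ≤ f := ph4 f (by simp)
    have h_a_c3 : a ≤ c3 := le_trans h_a_b h_b_c3
    have h_a_d : a ≤ d := le_trans h_a_c3 h_c3_d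
    have h_a_e : a ≤ e := le_trans h_a_d h_d_e
    have h_a_f : a ≤ f := le_trans h_a_e h_e_f
    have h_b_d : b ≤ d := le_trans h_b_c3 h_c3_d
    have h_b_e : b ≤ e := le_trans h_b_d h_d_e
    have h_b_f : b ≤ f := le_trans h_b_e h_e_f
    have h_c3_e : c3 ≤ e := le_trans h_c3_d h_d_e
    have h_c3_f : c3 ≤ f := le_trans h_c3_e h_e_f
    have h_d_f : d ≤ f := le_trans h_d_e h_e_f
    rw [show PySem.List.maxD ((PySem.List.combinations [a,b,c3,d,e,f] 3).map pyProd)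
          (fun x => x) 1 = max (max (max (max (max (max (max (max (max (max (max (max (max (max (max (max (max (max (max (1*a*b*c3) (1*a*b*d)) (1*a*b*e)) (1*a*b*f)) (1*a*c3*d)) (1*a*c3*e)) (1*a*c3*f)) (1*a*d*e)) (1*a*d*f)) (1*a*e*f)) (1*b*c3*d)) (1*b*c3*e)) (1*b*c3*f)) (1*b*d*e)) (1*b*d*f)) (1*b*e*f)) (1*c3*d*e)) (1*c3*d*f)) (1*c3*e*f)) (1*d*e*f) by
        rw [show (PySem.List.combinations [a,b,c3,d,e,f] 3).map pyProd =
            [1*a*b*c3, 1*a*b*d, 1*a*b*e, 1*a*b*f, 1*a*c3*d, 1*a*c3*e, 1*a*c3*f, 1*a*d*e, 1*a*d*f, 1*a*e*f, 1*b*c3*d, 1*b*c3*e, 1*b*c3*f, 1*b*d*e, 1*b*d*f, 1*b*e*f, 1*c3*d*e, 1*c3*d*f, 1*c3*e*f, 1*d*e*f] from rfl]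
        simp only [PySem.List.maxD]
        rw [PySem.List.max?_id_cons]
        rfl]
    show max 0 (max (max (max (max (max (max (max (max (max (max (max (max (max (max (max (max (max (max (max (1*a*b*c3) (1*a*b*d)) (1*a*b*e)) (1*a*b*f)) (1*a*c3*d)) (1*a*c3*e)) (1*a*c3*f)) (1*a*d*e)) (1*a*d*f)) (1*a*e*f)) (1*b*c3*d)) (1*b*c3*e)) (1*b*c3*f)) (1*b*d*e)) (1*b*d*f)) (1*b*e*f)) (1*c3*d*e)) (1*c3*d*f)) (1*c3*e*f)) (1*d*e*f)) = max (max 0 (f * e * d)) (a * b * f)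
    set M := max (max 0 (f * e * d)) (a * b * f) with hM
    have h0 : (0:Int) ≤ M := le_trans (le_max_left 0 _) (le_max_left _ _)
    have hX : f * e * d ≤ M := le_trans (le_max_right 0 _) (le_max_left _ _)
    have hY : a * b * f ≤ M := le_max_right _ _
    have hdef : d * e * f ≤ M := by
      calc d * e * f = f * e * d := by ring
        _ ≤ M := hX
    have habf : a * b * f ≤ M := by
      calc a * b * f = a * b * f := by ring
        _ ≤ M := hY
    have T := tri a b d e f M h0 hdef habf
    apply le_antisymm
    · apply max_le h0
      try simp only [max_le_iff]
      repeat' apply And.intro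
      all_goals exact T _ _ _ (by linarith) (by linarith) (by linarith) (by linarith) (by linarith) (by linarith) (by linarith)
    · rw [hM]
      apply max_le
      · apply max_le (le_max_left 0 _)
        rw [show f * e * d = 1*d*e*f from by ring]
        exact le_trans (le_max_right _ _) (le_max_right 0 _)
      · rw [show a * b * f = 1*a*b*f from by ring]
        have hy : 1*a*b*f ≤ max (max (max (1*a*b*c3) (1*a*b*d)) (1*a*b*e)) (1*a*b*f) := le_max_right _ _
        have hy := le_trans hy (le_max_left (max (max (max (1*a*b*c3) (1*a*b*d)) (1*a*b*e)) (1*a*b*f)) (1*a*c3*d))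
        have hy := le_trans hy (le_max_left (max (max (max (max (1*a*b*c3) (1*a*b*d)) (1*a*b*e)) (1*a*b*f)) (1*a*c3*d)) (1*a*c3*e))
        have hy := le_trans hy (le_max_left (max (max (max (max (max (1*a*b*c3) (1*a*b*d)) (1*a*b*e)) (1*a*b*f)) (1*a*c3*d)) (1*a*c3*e)) (1*a*c3*f))
        have hy := le_trans hy (le_max_left (max (max (max (max (max (max (1*a*b*c3) (1*a*b*d)) (1*a*b*e)) (1*a*b*f)) (1*a*c3*d)) (1*a*c3*e)) (1*a*c3*f)) (1*a*d*e))
        have hy := le_trans hy (le_max_left (max (max (max (max (max (max (max (1*a*b*c3) (1*a*b*d)) (1*a*b*e)) (1*a*b*f)) (1*a*c3*d)) (1*a*c3*e)) (1*a*c3*f)) (1*a*d*e)) (1*a*d*f))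
        have hy := le_trans hy (le_max_left (max (max (max (max (max (max (max (max (1*a*b*c3) (1*a*b*d)) (1*a*b*e)) (1*a*b*f)) (1*a*c3*d)) (1*a*c3*e)) (1*a*c3*f)) (1*a*d*e)) (1*a*d*f)) (1*a*e*f))
        have hy := le_trans hy (le_max_left (max (max (max (max (max (max (max (max (max (1*a*b*c3) (1*a*b*d)) (1*a*b*e)) (1*a*b*f)) (1*a*c3*d)) (1*a*c3*e)) (1*a*c3*f)) (1*a*d*e)) (1*a*d*f)) (1*a*e*f)) (1*b*c3*d))
        have hy := le_trans hy (le_max_left (max (max (max (max (max (max (max (max (max (max (1*a*b*c3) (1*a*b*d)) (1*a*b*e)) (1*a*b*f)) (1*a*c3*d)) (1*a*c3*e)) (1*a*c3*f)) (1*a*d*e)) (1*a*d*f)) (1*a*e*f)) (1*b*c3*d)) (1*b*c3*e))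
        have hy := le_trans hy (le_max_left (max (max (max (max (max (max (max (max (max (max (max (1*a*b*c3) (1*a*b*d)) (1*a*b*e)) (1*a*b*f)) (1*a*c3*d)) (1*a*c3*e)) (1*a*c3*f)) (1*a*d*e)) (1*a*d*f)) (1*a*e*f)) (1*b*c3*d)) (1*b*c3*e)) (1*b*c3*f))
        have hy := le_trans hy (le_max_left (max (max (max (max (max (max (max (max (max (max (max (max (1*a*b*c3) (1*a*b*d)) (1*a*b*e)) (1*a*b*f)) (1*a*c3*d)) (1*a*c3*e)) (1*a*c3*f)) (1*a*d*e)) (1*a*d*f)) (1*a*e*f)) (1*b*c3*d)) (1*b*c3*e)) (1*b*c3*f)) (1*b*d*e))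
        have hy := le_trans hy (le_max_left (max (max (max (max (max (max (max (max (max (max (max (max (max (1*a*b*c3) (1*a*b*d)) (1*a*b*e)) (1*a*b*f)) (1*a*c3*d)) (1*a*c3*e)) (1*a*c3*f)) (1*a*d*e)) (1*a*d*f)) (1*a*e*f)) (1*b*c3*d)) (1*b*c3*e)) (1*b*c3*f)) (1*b*d*e)) (1*b*d*f))
        have hy := le_trans hy (le_max_left (max (max (max (max (max (max (max (max (max (max (max (max (max (max (1*a*b*c3) (1*a*b*d)) (1*a*b*e)) (1*a*b*f)) (1*a*c3*d)) (1*a*c3*e)) (1*a*c3*f)) (1*a*d*e)) (1*a*d*f)) (1*a*e*f)) (1*b*c3*d)) (1*b*c3*e)) (1*b*c3*f)) (1*b*d*e)) (1*b*d*f)) (1*b*e*f))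
        have hy := le_trans hy (le_max_left (max (max (max (max (max (max (max (max (max (max (max (max (max (max (max (1*a*b*c3) (1*a*b*d)) (1*a*b*e)) (1*a*b*f)) (1*a*c3*d)) (1*a*c3*e)) (1*a*c3*f)) (1*a*d*e)) (1*a*d*f)) (1*a*e*f)) (1*b*c3*d)) (1*b*c3*e)) (1*b*c3*f)) (1*b*d*e)) (1*b*d*f)) (1*b*e*f)) (1*c3*d*e))
        have hy := le_trans hy (le_max_left (max (max (max (max (max (max (max (max (max (max (max (max (max (max (max (max (1*a*b*c3) (1*a*b*d)) (1*a*b*e)) (1*a*b*f)) (1*a*c3*d)) (1*a*c3*e)) (1*a*c3*f)) (1*a*d*e)) (1*a*d*f)) (1*a*e*f)) (1*b*c3*d)) (1*b*c3*e)) (1*b*c3*f)) (1*b*d*e)) (1*b*d*f)) (1*b*e*f)) (1*c3*d*e)) (1*c3*d*f))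
        have hy := le_trans hy (le_max_left (max (max (max (max (max (max (max (max (max (max (max (max (max (max (max (max (max (1*a*b*c3) (1*a*b*d)) (1*a*b*e)) (1*a*b*f)) (1*a*c3*d)) (1*a*c3*e)) (1*a*c3*f)) (1*a*d*e)) (1*a*d*f)) (1*a*e*f)) (1*b*c3*d)) (1*b*c3*e)) (1*b*c3*f)) (1*b*d*e)) (1*b*d*f)) (1*b*e*f)) (1*c3*d*e)) (1*c3*d*f)) (1*c3*e*f))
        have hy := le_trans hy (le_max_left (max (max (max (max (max (max (max (max (max (max (max (max (max (max (max (max (max (max (1*a*b*c3) (1*a*b*d)) (1*a*b*e)) (1*a*b*f)) (1*a*c3*d)) (1*a*c3*e)) (1*a*c3*f)) (1*a*d*e)) (1*a*d*f)) (1*a*e*f)) (1*b*c3*d)) (1*b*c3*e)) (1*b*c3*f)) (1*b*d*e)) (1*b*d*f)) (1*b*e*f)) (1*c3*d*e)) (1*c3*d*f)) (1*c3*e*f)) (1*d*e*f))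
        exact le_trans hy (le_max_right 0 _)

-- the candidate expression: sorted output, at most 6 entries
lemma cand_props (sub : List Int) :
    (candOf sub).Pairwise (· ≤ ·) ∧ (candOf sub).length ≤ 6 := by
  unfold candOf
  set s := PySem.List.sorted sub (fun x => x) with hsdef
  have hsp : s.Pairwise (· ≤ ·) := by
    simpa using PySem.List.sorted_pairwise (xs := sub) (key := fun x => x)
  simp only [Nat.ofNat_nonneg, PySem.List.slice_to, Int.reduceToNat, PySem.List.slice_from,
    Int.reduceNeg, Nat.one_lt_ofNat, PySem.List.slice_from_neg_ofNat]
  have hsub : (s.take 3 ++ (s.drop 3).drop ((s.drop 3).length - 3)).Sublist s := by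
    have h1 : ((s.drop 3).drop ((s.drop 3).length - 3)).Sublist (s.drop 3) :=
      List.drop_sublist _ _
    have h2 := h1.append_left (s.take 3)
    simpa [List.take_append_drop] using h2
  constructor
  · exact hsp.sublist hsub
  · simp only [List.length_append, List.length_take, List.length_drop]
    omega

-- dfsA at fuel f+1, written with candOf / the combinations maximum
lemma dfsA_succ (g : PySem.Dict Int (List Int)) (cost : List Int) (f : Nat) (v p : Int)
    (coin : List Int) :
    dfsA g cost (f + 1) v p coin =
      (candOf (PySem.List.pyGetD cost v 0 ::
          (chainA g cost f v ((g.getD v []).filter (fun u => u != p)) coin).1),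
       PySem.List.pySetD
         (chainA g cost f v ((g.getD v []).filter (fun u => u != p)) coin).2 v
         (valOf (candOf (PySem.List.pyGetD cost v 0 ::
            (chainA g cost f v ((g.getD v []).filter (fun u => u != p)) coin).1)))) := by
  rw [dfsA]
  cases hC : chainA g cost f v ((g.getD v []).filter (fun u => u != p)) coin with
  | mk subs coin1 =>
    obtain ⟨hp6, hl6⟩ := cand_props (PySem.List.pyGetD cost v 0 :: subs)
    simp only [← coin_formula _ hp6 hl6]
    rfl

-- one machine run of a whole frame with nonzero fuel: it consumes cstepsM steps, finishes the
-- frame, and its cand/coin effect is A's chain over the frame's pending children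
lemma runM_frame (g : PySem.Dict Int (List Int)) (cost : List Int) (f : Nat)
    (IHchild : ∀ (u v : Int) (fs : List (Nat × Int × Int × List Int × List Int))
        (coin : List Int) (mf : Nat),
      runM g cost (dstepsM g f u v + mf)
          ((f, u, v, g.getD u [], [PySem.List.pyGetD cost u 0]) :: fs) coin
        = runM g cost mf (extendTop fs (dfsA g cost f u v coin).1) (dfsA g cost f u v coin).2) :
    ∀ (l : List Int) (v p : Int) (sub : List Int)
      (fs : List (Nat × Int × Int × List Int × List Int)) (coin : List Int) (mf : Nat),
      runM g cost (cstepsM g f v p l + mf) ((f + 1, v, p, l, sub) :: fs) coin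
        = runM g cost mf
            (extendTop fs (candOf (sub ++ (chainA g cost f v (l.filter (fun u => u != p)) coin).1)))
            (PySem.List.pySetD (chainA g cost f v (l.filter (fun u => u != p)) coin).2 v
              (valOf (candOf (sub ++ (chainA g cost f v (l.filter (fun u => u != p)) coin).1)))) := by
  intro l
  induction l with
  | nil =>
    intro v p sub fs coin mf
    rw [show cstepsM g f v p [] = 1 from by rw [cstepsM], Nat.add_comm 1 mf]
    rw [show List.filter (fun u => u != p) [] = [] from rfl]
    rw [show chainA g cost f v [] coin = ([], coin) from by rw [chainA]]
    simp only [runM, List.append_nil, candOf, valOf]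
  | cons u us ih =>
    intro v p sub fs coin mf
    by_cases h : u != p
    · rw [show List.filter (fun u => u != p) (u :: us) = u :: us.filter (fun u => u != p) by
        simp [h]]
      rw [show cstepsM g f v p (u :: us) = 1 + dstepsM g f u v + cstepsM g f v p us by
        rw [cstepsM, if_pos h]]
      have harr : 1 + dstepsM g f u v + cstepsM g f v p us + mf
          = (dstepsM g f u v + (cstepsM g f v p us + mf)) + 1 := by omega
      rw [harr, runM, if_pos h]
      rw [IHchild u v ((f + 1, v, p, us, sub) :: fs) coin (cstepsM g f v p us + mf)]
      rw [show extendTop ((f + 1, v, p, us, sub) :: fs) (dfsA g cost f u v coin).1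
          = (f + 1, v, p, us, sub ++ (dfsA g cost f u v coin).1) :: fs from rfl]
      rw [ih v p (sub ++ (dfsA g cost f u v coin).1) fs (dfsA g cost f u v coin).2 mf]
      rw [chainA]
      cases hA : dfsA g cost f u v coin with
      | mk c coin1 =>
        cases hC : chainA g cost f v (us.filter (fun u => u != p)) coin1 with
        | mk rest coin2 =>
          simp only [hC, List.append_assoc]
    · have h' : (u != p) = false := by simpa using h
      rw [show List.filter (fun u => u != p) (u :: us) = us.filter (fun u => u != p) by
        simp [h']]
      rw [show cstepsM g f v p (u :: us) = 1 + 0 + cstepsM g f v p us by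
        rw [cstepsM, if_neg (by simp [h'])]]
      have harr : 1 + 0 + cstepsM g f v p us + mf = (cstepsM g f v p us + mf) + 1 := by omega
      rw [harr, runM, if_neg (by simp [h'])]
      exact ih v p sub fs coin mf

-- a frame freshly pushed for node u with parent v runs exactly like dfsA at the same fuel
lemma runM_dfs (g : PySem.Dict Int (List Int)) (cost : List Int) :
    ∀ (f : Nat) (u v : Int) (fs : List (Nat × Int × Int × List Int × List Int))
      (coin : List Int) (mf : Nat),
      runM g cost (dstepsM g f u v + mf)
          ((f, u, v, g.getD u [], [PySem.List.pyGetD cost u 0]) :: fs) coin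
        = runM g cost mf (extendTop fs (dfsA g cost f u v coin).1) (dfsA g cost f u v coin).2 := by
  intro f
  induction f with
  | zero =>
    intro u v fs coin mf
    rw [show dstepsM g 0 u v = 1 from by rw [dstepsM], Nat.add_comm 1 mf]
    rw [show dfsA g cost 0 u v coin = ([], coin) from by rw [dfsA]]
    rfl
  | succ f ih =>
    intro u v fs coin mf
    rw [show dstepsM g (f + 1) u v = cstepsM g f u v (g.getD u []) from by rw [dstepsM]]
    rw [runM_frame g cost f ih (g.getD u []) u v [PySem.List.pyGetD cost u 0] fs coin mf]
    rw [dfsA_succ]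
    rfl

theorem placedCoins_eq_alt (edges : List (List Int)) (cost : List Int) :
    placedCoins edges cost = placedCoins_alt edges cost := by
  unfold placedCoins placedCoins_alt
  rw [buildG_eq]
  rw [runM_dfs (buildGB edges) cost (edges.length + 1) 0 0 [] (List.replicate cost.length 0) 1]
  cases dfsA (buildGB edges) cost (edges.length + 1) 0 0 (List.replicate cost.length 0) with
  | mk c coin => rfl

-- ===== VERDICT (by name: the statement is the Claim_ definition above) =====
theorem placedCoins_spec : Claim_equal_placedCoins := by
  intro edges cost _ _
  unfold Spec_placedCoins
  exact placedCoins_eq_alt edges cost
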